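-- pv_equiv track=rewrite | github.com/Open-Earth-Foundation/Query_mechanism_urbind | backend/modules/writer/utils/markdown_helpers.py | strip_existing_footer_sections
-- ===== SOURCE A (Python) =====
-- def is_generated_footer_header(line: str) -> bool:
--     """Return True when a line starts a generated footer block."""
--     normalized = line.strip().lower()
--     if not normalized:
--         return False
--     normalized = normalized[:-1] if normalized.endswith(":") else normalized
--     return normalized in {
--         "cities considered",
--         "## cities considered",
--         "## cities with no important evidence found",
--     }
--
-- def strip_existing_footer_sections(content: str) -> str:
--     """Remove existing generated footer blocks before appending canonical sections."""
--     cleaned_lines: list[str] = []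
--     skip_footer_block = False
--     for line in content.splitlines():
--         stripped = line.strip()
--         if is_generated_footer_header(stripped):
--             skip_footer_block = True
--             continue
--
--         if skip_footer_block:
--             if not stripped or stripped.startswith("- ") or stripped.startswith("* "):
--                 continue
--             if is_generated_footer_header(stripped):
--                 continue
--             skip_footer_block = False
--
--         if not skip_footer_block:
--             cleaned_lines.append(line)
--     return "\n".join(cleaned_lines).strip()
-- ===== SOURCE B (Python) =====
-- def is_generated_footer_header(line: str) -> bool:
--     """Return True when a line starts a generated footer block."""
--     normalized = line.strip().lower()
--     if not normalized:
--         return False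
--     normalized = normalized[:-1] if normalized.endswith(":") else normalized
--     return normalized in {
--         "cities considered",
--         "## cities considered",
--         "## cities with no important evidence found",
--     }
--
-- def _trim(seg: list) -> list:
--     """Drop the leading run of blank / '- ' / '* ' lines of a segment."""
--     for j, line in enumerate(seg):
--         t = line.strip()
--         if t and not t.startswith("- ") and not t.startswith("* "):
--             return seg[j:]
--     return []
--
-- def strip_existing_footer_sections(content: str) -> str:
--     """Staged approach: split the lines into segments at footer-header lines
--     (dropping the headers), trim the leading bullet/blank run of every segment
--     after the first, and concatenate."""
--     segments = [[]]
--     for line in content.splitlines():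
--         if is_generated_footer_header(line.strip()):
--             segments.append([])
--         else:
--             segments[-1].append(line)
--     kept = segments[0] + [line for seg in segments[1:] for line in _trim(seg)]
--     return "\n".join(kept).strip()
-- ===== Notes on version B (the rewrite author's own statement) =====
-- stated objective: alternative
-- what changed: Replaces A's stateful single pass with a boolean skip flag by a staged pipeline: split the lines into segments at footer-header lines, trim the leading blank/bullet run of every segment after the first, then concatenate and join.
import Mathlib
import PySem

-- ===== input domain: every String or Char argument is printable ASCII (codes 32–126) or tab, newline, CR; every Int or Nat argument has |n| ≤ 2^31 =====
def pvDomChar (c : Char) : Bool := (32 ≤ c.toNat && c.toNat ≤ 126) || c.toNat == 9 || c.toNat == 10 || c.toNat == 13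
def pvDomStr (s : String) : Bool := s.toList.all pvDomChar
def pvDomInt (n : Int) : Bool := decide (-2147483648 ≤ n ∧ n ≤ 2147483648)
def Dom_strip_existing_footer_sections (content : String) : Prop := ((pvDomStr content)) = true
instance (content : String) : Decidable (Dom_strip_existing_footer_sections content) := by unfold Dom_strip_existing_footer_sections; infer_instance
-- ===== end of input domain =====

-- B replaces A's stateful skip-flag pass by a staged pipeline (split into
-- segments at footer headers, trim leading blank/bullet runs, concatenate);
-- same cost, different decomposition.

-- ===== PORT A =====
-- shared helper (identical in Source A and Source B)
def is_generated_footer_header (line : String) : Bool :=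
  let normalized := PySem.Str.lower (PySem.Str.strip line)
  if normalized == "" then false
  else
    let normalized :=
      if PySem.Str.endswith normalized ":" then PySem.Str.slice normalized none (some (-1))
      else normalized
    (normalized == "cities considered" || normalized == "## cities considered" ||
     normalized == "## cities with no important evidence found")

-- one iteration of A's for-loop over (cleaned_lines, skip_footer_block)
def stepA (st : List String × Bool) (line : String) : List String × Bool :=
  let stripped := PySem.Str.strip line
  if is_generated_footer_header stripped then (st.1, true)
  else if st.2 && (stripped == "" || PySem.Str.startswith stripped "- " || PySem.Str.startswith stripped "* ") then st
  else if st.2 && is_generated_footer_header stripped then st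
  else (st.1 ++ [line], false)

def strip_existing_footer_sections (content : String) : String :=
  PySem.Str.strip (PySem.Str.join "\n" (((PySem.Str.splitlines content).foldl stepA ([], false)).1))

-- ===== PORT B =====
-- _trim's predicate: blank or '- ' / '* ' bullet line
def skipLine (l : String) : Bool :=
  let t := PySem.Str.strip l
  t == "" || PySem.Str.startswith t "- " || PySem.Str.startswith t "* "

-- split the lines into segments at footer-header lines, dropping the headers
def splitSegs : List String → List (List String)
  | [] => [[]]
  | l :: rest =>
    match splitSegs rest with
    | [] => []  -- unreachable: splitSegs always returns a nonempty list
    | seg :: ss =>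
      if is_generated_footer_header (PySem.Str.strip l) then [] :: seg :: ss
      else (l :: seg) :: ss

def strip_existing_footer_sections_alt (content : String) : String :=
  match splitSegs (PySem.Str.splitlines content) with
  | [] => ""  -- unreachable
  | s0 :: ss =>
    PySem.Str.strip (PySem.Str.join "\n"
      (s0 ++ (ss.map (List.dropWhile skipLine)).flatten))

-- ===== PRECONDITION & SPEC =====
def Spec_strip_existing_footer_sections (content : String) (out : String) : Prop := out = strip_existing_footer_sections_alt content
instance (content : String) (out : String) : Decidable (Spec_strip_existing_footer_sections content out) := by unfold Spec_strip_existing_footer_sections; infer_instance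

-- ===== CLAIM (what is proved, stated in full; the proofs are below) =====
def Claim_equal_strip_existing_footer_sections : Prop := ∀ (content : String), Dom_strip_existing_footer_sections content → Spec_strip_existing_footer_sections content (strip_existing_footer_sections content)

-- ===== LEMMAS AND PROOFS =====
-- B's kept lines when the scan starts outside a footer block
def cleanB (xs : List String) : List String :=
  match splitSegs xs with
  | [] => []
  | s0 :: ss => s0 ++ (ss.map (List.dropWhile skipLine)).flatten

-- B's kept lines when the scan starts inside a footer block (first segment trimmed too)
def cleanSkip (xs : List String) : List String :=
  ((splitSegs xs).map (List.dropWhile skipLine)).flatten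

theorem splitSegs_ne_nil : ∀ xs : List String, splitSegs xs ≠ []
  | [] => by simp [splitSegs]
  | l :: rest => by
    unfold splitSegs
    obtain ⟨seg, ss, h⟩ := List.exists_cons_of_ne_nil (splitSegs_ne_nil rest)
    rw [h]
    split
    next heq => simp at heq
    next seg' ss' heq => split <;> simp

theorem foldA_eq : ∀ (xs : List String) (acc : List String) (skip : Bool),
    (xs.foldl stepA (acc, skip)).1
      = acc ++ (if skip then cleanSkip xs else cleanB xs)
  | [], acc, skip => by
    cases skip <;> simp [cleanB, cleanSkip, splitSegs]
  | l :: rest, acc, skip => by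
    simp only [List.foldl_cons]
    obtain ⟨seg, ss, hsegs⟩ : ∃ seg ss, splitSegs rest = seg :: ss := by
      cases h : splitSegs rest with
      | nil => exact absurd h (splitSegs_ne_nil rest)
      | cons a b => exact ⟨a, b, rfl⟩
    by_cases hh : is_generated_footer_header (PySem.Str.strip l) = true
    · have hstep : stepA (acc, skip) l = (acc, true) := by
        simp only [stepA, hh, if_true]
      have hsplit : splitSegs (l :: rest) = [] :: seg :: ss := by
        simp [splitSegs, hsegs, hh]
      rw [hstep, foldA_eq rest acc true]
      cases skip <;>
        simp [cleanB, cleanSkip, hsplit, hsegs, List.dropWhile]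
    · have hhf : is_generated_footer_header (PySem.Str.strip l) = false := by
        simpa using hh
      have hsplit : splitSegs (l :: rest) = (l :: seg) :: ss := by
        simp [splitSegs, hsegs, hhf]
      by_cases hp : skipLine l = true
      · have hp' : (PySem.Str.strip l == "" || PySem.Str.startswith (PySem.Str.strip l) "- "
            || PySem.Str.startswith (PySem.Str.strip l) "* ") = true := by
          simpa [skipLine] using hp
        cases skip
        · have hstep : stepA (acc, false) l = (acc ++ [l], false) := by
            simp [stepA, hhf]
          rw [hstep, foldA_eq rest (acc ++ [l]) false]
          simp [cleanB, hsplit, hsegs]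
        · have hstep : stepA (acc, true) l = (acc, true) := by
            simp only [stepA, hhf, Bool.false_eq_true, if_false, Bool.true_and, hp', if_true]
          rw [hstep, foldA_eq rest acc true]
          simp [cleanSkip, hsplit, hsegs, List.dropWhile, hp]
      · have hpf : skipLine l = false := by simpa using hp
        have hp' : (PySem.Str.strip l == "" || PySem.Str.startswith (PySem.Str.strip l) "- "
            || PySem.Str.startswith (PySem.Str.strip l) "* ") = false := by
          simpa [skipLine] using hpf
        have hstep : stepA (acc, skip) l = (acc ++ [l], false) := by
          cases skip <;>
            simp only [stepA, hhf, Bool.false_eq_true, if_false, Bool.false_and, Bool.true_and, hp']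
        rw [hstep, foldA_eq rest (acc ++ [l]) false]
        cases skip
        · simp [cleanB, hsplit, hsegs]
        · simp [cleanB, cleanSkip, hsplit, hsegs, List.dropWhile, hpf]

-- ===== VERDICT (by name: the statement is the Claim_ definition above) =====
theorem strip_existing_footer_sections_spec : Claim_equal_strip_existing_footer_sections := by
  intro content _
  unfold Spec_strip_existing_footer_sections strip_existing_footer_sections strip_existing_footer_sections_alt
  rw [foldA_eq (PySem.Str.splitlines content) [] false]
  simp only [if_neg Bool.false_ne_true, List.nil_append, cleanB]
  cases h : splitSegs (PySem.Str.splitlines content) with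
  | nil => exact absurd h (splitSegs_ne_nil _)
  | cons s0 ss => rfl
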